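-- pv_equiv track=rewrite | github.com/amodaresi/AdapLeR | utils/classification_utils.py | calc_flops_per_length_bert_w_lr
-- ===== SOURCE A (Python) =====
-- def calc_flops_per_length_bert_w_lr(layers_n, num_labels):
--   def layer_flop_calculator(n):
--     flops = 3156 * n**2 + 14233554 * n
--     return flops
--
--   classifier_flops = 1537
--   flops = 1183537 + (num_labels - 1) * classifier_flops + 6152 * layers_n[0]
--   for n in layers_n:
--     flops += layer_flop_calculator(n)
--
--   return flops
-- ===== SOURCE B (Python) =====
-- def calc_flops_per_length_bert_w_lr(layers_n, num_labels):
--     counts = {}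
--     for n in layers_n:
--         counts[n] = counts.get(n, 0) + 1
--     flops = 1183537 + (num_labels - 1) * 1537 + 6152 * layers_n[0]
--     for n, c in counts.items():
--         flops += c * (3156 * n * n + 14233554 * n)
--     return flops
-- ===== Notes on version B (the rewrite author's own statement) =====
-- stated objective: alternative
-- what changed: Replaces A's per-element accumulation loop by hash aggregation: a counts dict over layers_n is built once, and the per-layer FLOP term is computed once per distinct length and multiplied by its multiplicity.
import Mathlib
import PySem

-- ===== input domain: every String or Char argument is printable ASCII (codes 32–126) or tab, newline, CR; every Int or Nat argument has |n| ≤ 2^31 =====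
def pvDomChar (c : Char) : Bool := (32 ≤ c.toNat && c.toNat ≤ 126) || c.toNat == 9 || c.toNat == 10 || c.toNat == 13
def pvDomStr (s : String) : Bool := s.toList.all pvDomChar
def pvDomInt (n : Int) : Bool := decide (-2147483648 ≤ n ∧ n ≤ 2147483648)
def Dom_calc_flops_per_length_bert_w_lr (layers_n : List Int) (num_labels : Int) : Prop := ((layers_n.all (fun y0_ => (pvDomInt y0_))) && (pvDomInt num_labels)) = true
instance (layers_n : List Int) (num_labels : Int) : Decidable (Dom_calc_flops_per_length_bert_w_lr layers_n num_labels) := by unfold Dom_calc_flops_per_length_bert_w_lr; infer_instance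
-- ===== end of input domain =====

-- B replaces A's per-layer accumulation loop with a dict of value counts built once,
-- then one pass over the DISTINCT layer lengths adding count * per-layer FLOPs (objective: alternative).


-- ===== PORT A =====
-- literal port: layers_n[0] via pyGet? (none = IndexError, excluded by Pre_), then the loop as a foldl
def calc_flops_per_length_bert_w_lr (layers_n : List Int) (num_labels : Int) : Int :=
  match PySem.List.pyGet? layers_n 0 with
  | none => 0  -- unreachable under Pre_ (Python raises IndexError here)
  | some h =>
    let classifier_flops : Int := 1537
    let flops : Int := 1183537 + (num_labels - 1) * classifier_flops + 6152 * h
    layers_n.foldl (fun acc n => acc + (3156 * n ^ 2 + 14233554 * n)) flops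

-- ===== PORT B =====
-- B builds a counts dict (value -> multiplicity) and then sums count * per-layer FLOPs over distinct values
def calc_flops_per_length_bert_w_lr_alt (layers_n : List Int) (num_labels : Int) : Int :=
  let counts : PySem.Dict Int Int :=
    layers_n.foldl (fun d n => d.insert n (d.getD n 0 + 1)) PySem.Dict.empty
  match PySem.List.pyGet? layers_n 0 with
  | none => 0  -- unreachable under Pre_ (Python raises IndexError here)
  | some h =>
    counts.items.foldl (fun acc p => acc + p.2 * (3156 * p.1 * p.1 + 14233554 * p.1))
      (1183537 + (num_labels - 1) * 1537 + 6152 * h)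

-- ===== PRECONDITION & SPEC =====
-- Pre_ excludes the empty list, on which both Pythons raise IndexError at layers_n[0].
def Pre_calc_flops_per_length_bert_w_lr (layers_n : List Int) (num_labels : Int) : Prop := layers_n ≠ []
instance (layers_n : List Int) (num_labels : Int) : Decidable (Pre_calc_flops_per_length_bert_w_lr layers_n num_labels) := by unfold Pre_calc_flops_per_length_bert_w_lr; infer_instance
def pvWitness_calc_flops_per_length_bert_w_lr : List Int × Int := ([3, 5], 2)
def Spec_calc_flops_per_length_bert_w_lr (layers_n : List Int) (num_labels : Int) (out : Int) : Prop := out = calc_flops_per_length_bert_w_lr_alt layers_n num_labels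
instance (layers_n : List Int) (num_labels : Int) (out : Int) : Decidable (Spec_calc_flops_per_length_bert_w_lr layers_n num_labels out) := by unfold Spec_calc_flops_per_length_bert_w_lr; infer_instance

-- ===== CLAIM (what is proved, stated in full; the proofs are below) =====
def Claim_equal_calc_flops_per_length_bert_w_lr : Prop := ∀ (layers_n : List Int) (num_labels : Int), Dom_calc_flops_per_length_bert_w_lr layers_n num_labels → Pre_calc_flops_per_length_bert_w_lr layers_n num_labels → Spec_calc_flops_per_length_bert_w_lr layers_n num_labels (calc_flops_per_length_bert_w_lr layers_n num_labels)

-- ===== LEMMAS AND PROOFS =====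
lemma foldl_add_sum {α : Type} (l : List α) (g : α → Int) (a : Int) :
    l.foldl (fun acc n => acc + g n) a = a + (l.map g).sum := by
  induction l generalizing a with
  | nil => simp
  | cons x xs ih => simp [ih]; ring

lemma sum_map_discard (s : List Int) (F : Int → Int) (x : Int) (hs : s.Nodup) :
    (s.map F).sum = (if x ∈ s then F x else 0)
      + ((s.filter (fun y => !(y == x))).map F).sum := by
  induction s with
  | nil => simp
  | cons y ys ih =>
    have hys : ys.Nodup := (List.nodup_cons.mp hs).2
    by_cases hxy : y = x
    · subst hxy
      have hy : y ∉ ys := (List.nodup_cons.mp hs).1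
      have hf : ys.filter (fun z => !(z == y)) = ys :=
        List.filter_eq_self.mpr (fun a ha => by simp; exact fun h => absurd (h ▸ ha) hy)
      simp [hf]
    · have hne : x ∈ (y :: ys) ↔ x ∈ ys := by simp [Ne.symm hxy]
      rw [List.map_cons, List.sum_cons, ih hys]
      simp only [List.filter_cons]
      have : (!(y == x)) = true := by simp [hxy]
      rw [this]
      simp only [hne]
      by_cases hx : x ∈ ys <;> simp [hx] <;> ring

lemma sum_counter (xs : List Int) (g : Int → Int) :
    ((PySem.Set.ofList xs).map (fun k => (xs.count k : Int) * g k)).sum = (xs.map g).sum := by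
  induction xs with
  | nil => simp
  | cons x xs ih =>
    rw [PySem.Set.ofList_cons]
    have hdisc : PySem.Set.discard (PySem.Set.ofList xs) x
        = (PySem.Set.ofList xs).filter (fun y => !(y == x)) := rfl
    have hcongr : ((PySem.Set.discard (PySem.Set.ofList xs) x).map
        (fun k => (((x :: xs).count k : Int)) * g k))
        = ((PySem.Set.discard (PySem.Set.ofList xs) x).map
        (fun k => ((xs.count k : Int)) * g k)) := by
      apply List.map_congr_left
      intro a ha
      have hax : a ≠ x := ((PySem.Set.mem_discard _ _ _).mp ha).2
      simp only [List.count_cons]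
      simp
      exact Or.inl (Ne.symm hax)
    have hsplit := sum_map_discard (PySem.Set.ofList xs)
      (fun k => ((xs.count k : Int)) * g k) x (PySem.Set.nodup_ofList xs)
    rw [← hdisc] at hsplit
    rw [ih] at hsplit
    have hif : (if x ∈ PySem.Set.ofList xs then ((xs.count x : Int)) * g x else 0)
        = ((xs.count x : Int)) * g x := by
      by_cases hx : x ∈ xs
      · rw [if_pos ((PySem.Set.mem_ofList xs x).mpr hx)]
      · rw [if_neg (fun h => hx ((PySem.Set.mem_ofList xs x).mp h))]
        rw [List.count_eq_zero.mpr hx]; simp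
    rw [hif] at hsplit
    simp only [List.map_cons, List.sum_cons, hcongr, List.count_cons_self]
    push_cast
    linarith [hsplit]

-- ===== VERDICT (by name: the statement is the Claim_ definition above) =====
theorem calc_flops_per_length_bert_w_lr_spec : Claim_equal_calc_flops_per_length_bert_w_lr := by
  intro layers_n num_labels _ hpre
  unfold Spec_calc_flops_per_length_bert_w_lr
  unfold calc_flops_per_length_bert_w_lr calc_flops_per_length_bert_w_lr_alt
  cases layers_n with
  | nil => exact absurd rfl hpre
  | cons h t =>
    have hg : PySem.List.pyGet? (h :: t) 0 = some h := by
      simp [PySem.List.pyGet?, PySem.List.pyIdx?]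
    simp only [hg, PySem.Dict.foldl_insert_getD_add_one_eq_counter]
    rw [foldl_add_sum, foldl_add_sum]
    rw [PySem.Dict.items_counter]
    rw [List.map_map]
    have : ((fun p : Int × Int => p.2 * (3156 * p.1 * p.1 + 14233554 * p.1)) ∘
        fun k => (k, ((h :: t).count k : Int)))
        = fun k => (((h :: t).count k : Int)) * (3156 * k * k + 14233554 * k) := rfl
    rw [this, sum_counter]
    have : (fun n : Int => 3156 * n ^ 2 + 14233554 * n)
        = fun n : Int => 3156 * n * n + 14233554 * n := by funext n; ring
    rw [this]
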